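-- pv_equiv track=rewrite | github.com/aria1th/Torus-Hamilton-Decomposition | scripts/torus_nd_d5_reset_formula_probe.py | _support_as_small_residue_union
-- ===== SOURCE A (Python) =====
-- from typing import Dict, List, Mapping, Sequence, Tuple
--
-- def _affine_value(key: Tuple[int, int, int], coeffs: Tuple[int, int, int], m: int) -> int:
--     return int(sum(c * x for c, x in zip(coeffs, key)) % m)
--
-- def _support_as_small_residue_union(
--     table: Mapping[Tuple[int, int, int], int],
--     coeffs: Tuple[int, int, int],
--     target_value: int,
--     m: int,
--     max_residues: int = 2,
-- ) -> Tuple[bool, List[int]]: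
--     fibers: Dict[int, set[Tuple[int, int, int]]] = {}
--     for key in table:
--         residue = _affine_value(key, coeffs, m)
--         fibers.setdefault(residue, set()).add(key)
--     support = {key for key, value in table.items() if int(value) == int(target_value)}
--     residues = sorted(residue for residue, pts in fibers.items() if pts and pts <= support)
--     union = set().union(*(fibers[residue] for residue in residues)) if residues else set()
--     return bool(union == support and len(residues) <= max_residues), residues
-- ===== SOURCE B (Python) =====
-- from typing import List, Mapping, Tuple
--
-- def _support_as_small_residue_union(
--     table: Mapping[Tuple[int, int, int], int],
--     coeffs: Tuple[int, int, int],
--     target_value: int,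
--     m: int,
--     max_residues: int = 2,
-- ) -> Tuple[bool, List[int]]:
--     # A residue's fiber is nonempty and fully inside the support iff the residue is
--     # witnessed by some support key and by no non-support key; the union of those
--     # fibers equals the support iff no support key shares a residue with a
--     # non-support key.  So two residue sets decide everything: no fibers, no
--     # point-set unions, no subset tests over keys.
--     c0, c1, c2 = coeffs
--     tv = int(target_value)
--     supp_res: set[int] = set()
--     bad_res: set[int] = set()
--     for key, value in table.items():
--         r = (c0 * key[0] + c1 * key[1] + c2 * key[2]) % m
--         if int(value) == tv:
--             supp_res.add(r)
--         else:
--             bad_res.add(r)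
--     residues = sorted(supp_res - bad_res)
--     return supp_res.isdisjoint(bad_res) and len(residues) <= max_residues, residues
-- ===== Notes on version B (the rewrite author's own statement) =====
-- stated objective: alternative
-- what changed: Instead of grouping keys into per-residue fibers and comparing point-sets (A's fibers dict, subset tests, set union and set equality over key tuples), B never groups keys at all: it classifies each key's residue into two residue sets (witnessed by a support key / by a non-support key), takes residues = sorted(supp_res - bad_res), and decides 'union == support' as disjointness of the two residue sets, using the fact that a fiber lies inside the support iff its residue has no non-support witness.
import Mathlib
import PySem

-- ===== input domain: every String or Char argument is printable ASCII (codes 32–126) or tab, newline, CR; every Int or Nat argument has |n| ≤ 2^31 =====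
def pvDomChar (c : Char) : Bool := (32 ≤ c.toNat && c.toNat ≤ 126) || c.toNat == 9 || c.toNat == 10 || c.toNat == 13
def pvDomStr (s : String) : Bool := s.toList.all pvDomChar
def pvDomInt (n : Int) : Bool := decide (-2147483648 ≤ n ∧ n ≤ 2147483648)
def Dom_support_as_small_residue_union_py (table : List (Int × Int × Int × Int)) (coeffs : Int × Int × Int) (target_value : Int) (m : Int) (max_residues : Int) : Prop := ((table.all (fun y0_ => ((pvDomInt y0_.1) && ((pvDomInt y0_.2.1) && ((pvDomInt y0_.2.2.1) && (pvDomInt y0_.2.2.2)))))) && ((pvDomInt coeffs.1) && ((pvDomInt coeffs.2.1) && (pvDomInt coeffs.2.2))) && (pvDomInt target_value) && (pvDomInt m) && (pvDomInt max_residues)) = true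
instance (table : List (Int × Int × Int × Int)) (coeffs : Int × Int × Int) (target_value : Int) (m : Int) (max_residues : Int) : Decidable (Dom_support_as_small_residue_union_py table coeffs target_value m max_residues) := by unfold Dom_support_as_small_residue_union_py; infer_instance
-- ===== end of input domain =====

-- B drops A's per-residue fibers, point-set subset tests and set union/equality entirely:
-- it classifies each key's residue into two residue sets (support-witnessed / non-support-witnessed),
-- takes their difference as the residue list and decides coverage by their disjointness
-- (objective: alternative). The equivalence is about the RETURN value; nothing is mutated.
-- The Lean argument 'table' is the dict as a pair list; both ports first rebuild the Python
-- dict (PySem.Dict.ofList: last value wins, first-occurrence key order), as the harness does.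

-- ===== PORT A =====
-- helper _affine_value: sum(c * x for c, x in zip(coeffs, key)) % m, written out over the 3-tuple
def affine_value_py (key : Int × Int × Int) (coeffs : Int × Int × Int) (m : Int) : Int :=
  PySem.Int.mod (coeffs.1 * key.1 + coeffs.2.1 * key.2.1 + coeffs.2.2 * key.2.2) m

def support_as_small_residue_union_py (table : List (Int × Int × Int × Int)) (coeffs : Int × Int × Int) (target_value : Int) (m : Int) (max_residues : Int) : Bool × List Int :=
  -- the dict the harness passes: pair list -> Python dict (last value wins, first-occurrence order)
  let d := PySem.Dict.ofList (table.map (fun q => ((q.1, q.2.1, q.2.2.1), q.2.2.2)))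
  -- fibers: Dict residue -> set of keys; fibers.setdefault(residue, set()).add(key)
  let fibers : PySem.Dict Int (PySem.Set (Int × Int × Int)) :=
    d.keys.foldl (fun f k =>
      f.modify (affine_value_py k coeffs m) PySem.Set.empty (fun s => PySem.Set.add s k))
      PySem.Dict.empty
  -- support = {key for key, value in table.items() if int(value) == int(target_value)}
  let support : PySem.Set (Int × Int × Int) :=
    d.items.foldl (fun s p => if p.2 == target_value then PySem.Set.add s p.1 else s) PySem.Set.empty
  -- residues = sorted(residue for residue, pts in fibers.items() if pts and pts <= support)
  let residues : List Int :=
    PySem.List.sorted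
      (((fibers.items.filter (fun p => !p.2.isEmpty && PySem.Set.issubset p.2 support)).map (·.1)))
      (fun x => x) false
  -- union = set().union(*(fibers[residue] for residue in residues)) if residues else set()
  let union : PySem.Set (Int × Int × Int) :=
    residues.foldl (fun u r => PySem.Set.union u (fibers.getD r PySem.Set.empty)) PySem.Set.empty
  (PySem.Set.equal union support && decide ((residues.length : Int) ≤ max_residues), residues)

-- ===== PORT B =====
def support_as_small_residue_union_py_alt (table : List (Int × Int × Int × Int)) (coeffs : Int × Int × Int) (target_value : Int) (m : Int) (max_residues : Int) : Bool × List Int :=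
  let d := PySem.Dict.ofList (table.map (fun q => ((q.1, q.2.1, q.2.2.1), q.2.2.2)))
  -- one loop: supp_res / bad_res, the residues witnessed by support / non-support keys
  let st : PySem.Set Int × PySem.Set Int :=
    d.items.foldl (fun st p =>
      let r := PySem.Int.mod (coeffs.1 * p.1.1 + coeffs.2.1 * p.1.2.1 + coeffs.2.2 * p.1.2.2) m
      if p.2 == target_value then (PySem.Set.add st.1 r, st.2) else (st.1, PySem.Set.add st.2 r))
      (PySem.Set.empty, PySem.Set.empty)
  -- residues = sorted(supp_res - bad_res)
  let residues : List Int := PySem.List.sorted (PySem.Set.diff st.1 st.2) (fun x => x) false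
  -- supp_res.isdisjoint(bad_res) and len(residues) <= max_residues
  (PySem.Set.isdisjoint st.1 st.2 && decide ((residues.length : Int) ≤ max_residues), residues)

-- ===== PRECONDITION & SPEC =====
-- Pre_ excludes only m = 0 with a nonempty table: there Python's '% m' raises ZeroDivisionError.
def Pre_support_as_small_residue_union_py (table : List (Int × Int × Int × Int)) (coeffs : Int × Int × Int) (target_value : Int) (m : Int) (max_residues : Int) : Prop :=
  table = [] ∨ m ≠ 0
instance (table : List (Int × Int × Int × Int)) (coeffs : Int × Int × Int) (target_value : Int) (m : Int) (max_residues : Int) : Decidable (Pre_support_as_small_residue_union_py table coeffs target_value m max_residues) := by unfold Pre_support_as_small_residue_union_py; infer_instance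

def pvWitness_support_as_small_residue_union_py : (List (Int × Int × Int × Int)) × (Int × Int × Int) × Int × Int × Int :=
  ([(0, 0, 1, 5), (1, 0, 0, 5), (0, 1, 0, 3)], (1, 2, 3), 5, 4, 2)

def Spec_support_as_small_residue_union_py (table : List (Int × Int × Int × Int)) (coeffs : Int × Int × Int) (target_value : Int) (m : Int) (max_residues : Int) (out : Bool × List Int) : Prop := out = support_as_small_residue_union_py_alt table coeffs target_value m max_residues
instance (table : List (Int × Int × Int × Int)) (coeffs : Int × Int × Int) (target_value : Int) (m : Int) (max_residues : Int) (out : Bool × List Int) : Decidable (Spec_support_as_small_residue_union_py table coeffs target_value m max_residues out) := by unfold Spec_support_as_small_residue_union_py; infer_instance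

-- ===== CLAIM (what is proved, stated in full; the proofs are below) =====
def Claim_equal_support_as_small_residue_union_py : Prop := ∀ (table : List (Int × Int × Int × Int)) (coeffs : Int × Int × Int) (target_value : Int) (m : Int) (max_residues : Int), Dom_support_as_small_residue_union_py table coeffs target_value m max_residues → Pre_support_as_small_residue_union_py table coeffs target_value m max_residues → Spec_support_as_small_residue_union_py table coeffs target_value m max_residues (support_as_small_residue_union_py table coeffs target_value m max_residues)

-- ===== LEMMAS AND PROOFS =====

-- adding pairwise-fresh distinct elements to a set is plain list append
theorem pv_foldl_add_of_disjoint {a : Type} [BEq a] [LawfulBEq a] (xs : List a) (s : PySem.Set a)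
    (h : forall x, x ∈ xs -> x ∉ s) (hx : xs.Nodup) : xs.foldl PySem.Set.add s = s ++ xs := by
  induction xs generalizing s with
  | nil => simp
  | cons b t ih =>
    have hna : PySem.Set.add s b = s ++ [b] := by
      unfold PySem.Set.add
      rw [if_neg]
      intro hc
      exact h b (by simp) ((PySem.Set.contains_iff s b).mp hc)
    rw [List.foldl_cons, hna, ih]
    · simp
    · intro x hxt hmem
      rcases List.mem_append.mp hmem with hs | hsing
      · exact h x (by simp [hxt]) hs
      · exact (List.nodup_cons.mp hx).1 (List.mem_singleton.mp hsing ▸ hxt)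
    · exact (List.nodup_cons.mp hx).2

theorem pv_union_of_disjoint {a : Type} [BEq a] [LawfulBEq a] (s t : PySem.Set a)
    (h : forall x, x ∈ t -> x ∉ s) (ht : t.Nodup) : PySem.Set.union s t = s ++ t :=
  pv_foldl_add_of_disjoint t s h ht

-- the setdefault/add grouping loop: each residue's fiber is the filtered key list
theorem pv_fibers_getD {a k : Type} [BEq a] [LawfulBEq a] [BEq k] [LawfulBEq k] [DecidableEq k]
    (rk : a -> k) (l : List a) (d : PySem.Dict k (PySem.Set a))
    (hd : forall r x, x ∈ l -> x ∉ d.getD r PySem.Set.empty) (hl : l.Nodup) (r : k) :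
    (l.foldl (fun f x => f.modify (rk x) PySem.Set.empty (fun s => PySem.Set.add s x)) d).getD r PySem.Set.empty
      = d.getD r PySem.Set.empty ++ l.filter (fun x => rk x == r) := by
  induction l generalizing d with
  | nil => simp
  | cons b t ih =>
    have hadd : PySem.Set.add (d.getD (rk b) PySem.Set.empty) b = d.getD (rk b) PySem.Set.empty ++ [b] := by
      unfold PySem.Set.add
      rw [if_neg]
      intro hc
      exact hd (rk b) b (by simp) ((PySem.Set.contains_iff _ b).mp hc)
    rw [List.foldl_cons, ih]
    · rw [PySem.Dict.getD_modify, List.filter_cons]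
      by_cases hr : r = rk b
      · rw [if_pos hr, hadd]
        have : (rk b == r) = true := by simp [hr]
        simp [hr]
      · rw [if_neg hr]
        have : (rk b == r) = false := by simp; exact fun h => hr h.symm
        simp [this]
    · intro r' x hxt
      rw [PySem.Dict.getD_modify]
      by_cases hr : r' = rk b
      · rw [if_pos hr, hadd]
        intro hmem
        rcases List.mem_append.mp hmem with hs | hsing
        · exact hd (rk b) x (by simp [hxt]) hs
        · exact (List.nodup_cons.mp hl).1 (List.mem_singleton.mp hsing ▸ hxt)
      · rw [if_neg hr]
        exact hd r' x (by simp [hxt])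
    · exact (List.nodup_cons.mp hl).2

-- the union accumulation over distinct residues concatenates disjoint fibers
theorem pv_union_fold {a : Type} [BEq a] [LawfulBEq a]
    (rk : a -> Int) (keys : List a) (hk : keys.Nodup) (l : List Int) (hl : l.Nodup)
    (acc : PySem.Set a) (hacc : forall x, x ∈ acc -> rk x ∉ l) :
    l.foldl (fun u r => PySem.Set.union u (keys.filter (fun x => rk x == r))) acc
      = acc ++ l.flatMap (fun r => keys.filter (fun x => rk x == r)) := by
  induction l generalizing acc with
  | nil => simp
  | cons b t ih =>
    have hu : PySem.Set.union acc (keys.filter (fun x => rk x == b)) = acc ++ keys.filter (fun x => rk x == b) := by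
      apply pv_union_of_disjoint
      · intro x hx hxa
        have : rk x = b := by simpa using (List.mem_filter.mp hx).2
        exact hacc x hxa (by simp [this])
      · exact hk.filter _
    have hacc' : forall x, x ∈ acc ++ keys.filter (fun x => rk x == b) -> rk x ∉ t := by
      intro x hx
      rcases List.mem_append.mp hx with hs | hf
      · intro hmem; exact hacc x hs (by simp [hmem])
      · have : rk x = b := by simpa using (List.mem_filter.mp hf).2
        rw [this]; exact (List.nodup_cons.mp hl).1
    rw [List.foldl_cons, hu, ih (List.nodup_cons.mp hl).2 _ hacc']
    simp

-- with unique keys, a key is in the support iff its own value is the target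
theorem pv_mem_suppKeys {a : Type} (es : List (a × Int)) (hnd : (es.map Prod.fst).Nodup)
    (tv : Int) (p : a × Int) (hp : p ∈ es) :
    p.1 ∈ (es.filter (fun q => q.2 == tv)).map Prod.fst ↔ (p.2 == tv) = true := by
  constructor
  · intro h
    rcases List.mem_map.mp h with ⟨q, hq, hq1⟩
    have hqe : q ∈ es := (List.filter_sublist.subset) hq
    have : q = p := List.inj_on_of_nodup_map hnd hqe hp hq1
    rw [← this]
    exact (List.mem_filter.mp hq).2
  · intro h
    exact List.mem_map.mpr ⟨p, List.mem_filter.mpr ⟨hp, h⟩, rfl⟩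

-- proof-side named pieces of the two port bodies (defeq to the ports' let-expressions)
def pvFibers (d : PySem.Dict (Int × Int × Int) Int) (rk : (Int × Int × Int) → Int) : PySem.Dict Int (PySem.Set (Int × Int × Int)) :=
  d.keys.foldl (fun f k => f.modify (rk k) PySem.Set.empty (fun s => PySem.Set.add s k)) PySem.Dict.empty

def pvSupport (d : PySem.Dict (Int × Int × Int) Int) (tv : Int) : PySem.Set (Int × Int × Int) :=
  d.items.foldl (fun s p => if p.2 == tv then PySem.Set.add s p.1 else s) PySem.Set.empty

def pvResA (d : PySem.Dict (Int × Int × Int) Int) (rk : (Int × Int × Int) → Int) (tv : Int) : List Int :=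
  PySem.List.sorted
    (((pvFibers d rk).items.filter (fun p => !p.2.isEmpty && PySem.Set.issubset p.2 (pvSupport d tv))).map (·.1))
    (fun x => x) false

def pvUnion (d : PySem.Dict (Int × Int × Int) Int) (rk : (Int × Int × Int) → Int) (tv : Int) : PySem.Set (Int × Int × Int) :=
  (pvResA d rk tv).foldl (fun u r => PySem.Set.union u ((pvFibers d rk).getD r PySem.Set.empty)) PySem.Set.empty

def pvAg (d : PySem.Dict (Int × Int × Int) Int) (rk : (Int × Int × Int) → Int) (tv mx : Int) : Bool × List Int :=
  (PySem.Set.equal (pvUnion d rk tv) (pvSupport d tv) && decide (((pvResA d rk tv).length : Int) ≤ mx), pvResA d rk tv)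

def pvSt (d : PySem.Dict (Int × Int × Int) Int) (rk : (Int × Int × Int) → Int) (tv : Int) : PySem.Set Int × PySem.Set Int :=
  d.items.foldl (fun st p =>
    if p.2 == tv then (PySem.Set.add st.1 (rk p.1), st.2) else (st.1, PySem.Set.add st.2 (rk p.1)))
    (PySem.Set.empty, PySem.Set.empty)

def pvResB (d : PySem.Dict (Int × Int × Int) Int) (rk : (Int × Int × Int) → Int) (tv : Int) : List Int :=
  PySem.List.sorted (PySem.Set.diff (pvSt d rk tv).1 (pvSt d rk tv).2) (fun x => x) false

def pvBg (d : PySem.Dict (Int × Int × Int) Int) (rk : (Int × Int × Int) → Int) (tv mx : Int) : Bool × List Int :=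
  (PySem.Set.isdisjoint (pvSt d rk tv).1 (pvSt d rk tv).2 && decide (((pvResB d rk tv).length : Int) ≤ mx), pvResB d rk tv)

-- support keys, and the two residue sets, as explicit lists
def pvSuppKeys (d : PySem.Dict (Int × Int × Int) Int) (tv : Int) : List (Int × Int × Int) :=
  (d.items.filter (fun p => p.2 == tv)).map Prod.fst

def pvSpRes (d : PySem.Dict (Int × Int × Int) Int) (rk : (Int × Int × Int) → Int) (tv : Int) : PySem.Set Int :=
  PySem.Set.ofList ((d.items.filter (fun p => p.2 == tv)).map (fun p => rk p.1))

def pvBdRes (d : PySem.Dict (Int × Int × Int) Int) (rk : (Int × Int × Int) → Int) (tv : Int) : PySem.Set Int :=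
  PySem.Set.ofList ((d.items.filter (fun p => !(p.2 == tv))).map (fun p => rk p.1))

theorem pv_st_eq (d : PySem.Dict (Int × Int × Int) Int) (rk : (Int × Int × Int) → Int) (tv : Int) :
    pvSt d rk tv = (pvSpRes d rk tv, pvBdRes d rk tv) := by
  unfold pvSt pvSpRes pvBdRes
  have hfun : (fun (st : PySem.Set Int × PySem.Set Int) (p : (Int × Int × Int) × Int) =>
        if p.2 == tv then (PySem.Set.add st.1 (rk p.1), st.2) else (st.1, PySem.Set.add st.2 (rk p.1)))
      = fun st p => ((if p.2 == tv then PySem.Set.add st.1 (rk p.1) else st.1),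
                     (if !(p.2 == tv) then PySem.Set.add st.2 (rk p.1) else st.2)) := by
    funext st p
    by_cases h : (p.2 == tv) = true <;> simp [h]
  rw [hfun, PySem.List.foldl_prod_mk (f := fun (s : PySem.Set Int) (p : (Int × Int × Int) × Int) => if p.2 == tv then PySem.Set.add s (rk p.1) else s)
      (g := fun (s : PySem.Set Int) (p : (Int × Int × Int) × Int) => if !(p.2 == tv) then PySem.Set.add s (rk p.1) else s)]
  rw [PySem.List.foldl_if_eq_foldl_filter (p := fun (p : (Int × Int × Int) × Int) => p.2 == tv)
      (f := fun (s : PySem.Set Int) (p : (Int × Int × Int) × Int) => PySem.Set.add s (rk p.1))]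
  rw [PySem.List.foldl_if_eq_foldl_filter (p := fun (p : (Int × Int × Int) × Int) => !(p.2 == tv))
      (f := fun (s : PySem.Set Int) (p : (Int × Int × Int) × Int) => PySem.Set.add s (rk p.1))]
  rw [show (PySem.Set.empty : PySem.Set Int) = ([] : PySem.Set Int) from rfl,
      ← PySem.Set.update_nil_left ((d.items.filter (fun p => p.2 == tv)).map (fun p => rk p.1)),
      ← PySem.Set.update_nil_left ((d.items.filter (fun p => !(p.2 == tv))).map (fun p => rk p.1)),
      PySem.Set.update_map_eq_foldl_add, PySem.Set.update_map_eq_foldl_add]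

theorem pv_support_eq (d : PySem.Dict (Int × Int × Int) Int) (tv : Int) (hnd : d.keys.Nodup) :
    pvSupport d tv = pvSuppKeys d tv := by
  unfold pvSupport pvSuppKeys
  rw [PySem.List.foldl_if_eq_foldl_filter (p := fun (p : (Int × Int × Int) × Int) => p.2 == tv)
      (f := fun (s : PySem.Set (Int × Int × Int)) (p : (Int × Int × Int) × Int) => PySem.Set.add s p.1)]
  rw [show List.foldl (fun s p => PySem.Set.add s p.1) PySem.Set.empty (d.items.filter (fun p => p.2 == tv))
        = List.foldl PySem.Set.add PySem.Set.empty ((d.items.filter (fun p => p.2 == tv)).map Prod.fst) from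
      (List.foldl_map (f := (Prod.fst : (Int × Int × Int) × Int -> Int × Int × Int))
        (g := (PySem.Set.add : PySem.Set (Int × Int × Int) -> (Int × Int × Int) -> PySem.Set (Int × Int × Int)))).symm]
  have hsupnd : ((d.items.filter (fun p => p.2 == tv)).map Prod.fst).Nodup :=
    ((List.filter_sublist).map Prod.fst).nodup hnd
  simpa [PySem.Set.empty] using
    pv_foldl_add_of_disjoint ((d.items.filter (fun p => p.2 == tv)).map Prod.fst) PySem.Set.empty
      (by intro x _ hmem; simp [PySem.Set.empty] at hmem) hsupnd

theorem pv_fiber_getD (d : PySem.Dict (Int × Int × Int) Int) (rk : (Int × Int × Int) → Int)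
    (hnd : d.keys.Nodup) (r : Int) :
    (pvFibers d rk).getD r PySem.Set.empty = d.keys.filter (fun x => rk x == r) := by
  unfold pvFibers
  have h := pv_fibers_getD rk d.keys PySem.Dict.empty
    (by intro r' x _ hmem; simp [PySem.Dict.getD_empty, PySem.Set.empty] at hmem) hnd r
  simpa [PySem.Dict.getD_empty, PySem.Set.empty] using h

-- the residue list of A, pre-sort, as a filter of the distinct residues
theorem pv_listA_eq (d : PySem.Dict (Int × Int × Int) Int) (rk : (Int × Int × Int) → Int) (tv : Int)
    (hnd : d.keys.Nodup) :
    ((pvFibers d rk).items.filter (fun p => !p.2.isEmpty && PySem.Set.issubset p.2 (pvSupport d tv))).map (·.1)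
      = List.filter (fun r => !(d.keys.filter (fun x => rk x == r)).isEmpty
          && PySem.Set.issubset (d.keys.filter (fun x => rk x == r)) (pvSupport d tv))
          (PySem.Set.ofList (d.keys.map rk)) := by
  have hfibnd : (pvFibers d rk).keys.Nodup :=
    PySem.Dict.nodup_keys_foldl_modify_key d.keys rk PySem.Set.empty (fun _ x => fun s => PySem.Set.add s x)
      PySem.Dict.empty PySem.Dict.nodup_keys_empty
  have hfibK : (pvFibers d rk).keys = PySem.Set.ofList (d.keys.map rk) := by
    have h := PySem.Dict.keys_foldl_modify_key d.keys rk PySem.Set.empty (fun _ x => fun s => PySem.Set.add s x) PySem.Dict.empty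
    simpa [PySem.Dict.keys_empty] using h
  have hitems : (pvFibers d rk).items
      = (PySem.Set.ofList (d.keys.map rk)).map (fun r => (r, d.keys.filter (fun x => rk x == r))) := by
    rw [PySem.Dict.items_eq_map_keys _ hfibnd PySem.Set.empty, hfibK]
    exact List.map_congr_left (fun r _ => by rw [pv_fiber_getD d rk hnd])
  rw [hitems, List.filter_map, List.map_map]
  rw [show ((fun (x : Int × PySem.Set (Int × Int × Int)) => x.1) ∘ (fun r => (r, d.keys.filter (fun x => rk x == r))))
        = fun (r : Int) => r from rfl, List.map_id_fun']
  rfl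

-- the heart: a residue passes A's fiber test iff it is a support residue and not a bad residue
theorem pv_mem_listA_iff (d : PySem.Dict (Int × Int × Int) Int) (rk : (Int × Int × Int) → Int) (tv : Int)
    (hnd : d.keys.Nodup) (r : Int) :
    r ∈ List.filter (fun r => !(d.keys.filter (fun x => rk x == r)).isEmpty
          && PySem.Set.issubset (d.keys.filter (fun x => rk x == r)) (pvSuppKeys d tv))
          (PySem.Set.ofList (d.keys.map rk))
      ↔ r ∈ pvSpRes d rk tv ∧ r ∉ pvBdRes d rk tv := by
  have hkeys : d.keys = d.items.map Prod.fst := rfl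
  have hsupp := pv_mem_suppKeys d.items (hkeys ▸ hnd) tv
  constructor
  · intro h
    have h1 := List.mem_of_mem_filter h
    have h2 := List.of_mem_filter h
    rw [Bool.and_eq_true] at h2
    have hsub := (PySem.Set.issubset_iff _ _).mp h2.2
    rcases List.mem_map.mp ((PySem.Set.mem_ofList _ _).mp h1) with ⟨x, hx, hrx⟩
    have hxf : x ∈ d.keys.filter (fun y => rk y == r) := List.mem_filter.mpr ⟨hx, by simp [hrx]⟩
    constructor
    · -- x is a support key witnessing residue r
      have hxs : x ∈ pvSuppKeys d tv := hsub x hxf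
      rcases List.mem_map.mp hxs with ⟨p, hp, hp1⟩
      refine (PySem.Set.mem_ofList _ _).mpr (List.mem_map.mpr ⟨p, hp, ?_⟩)
      rw [hp1, hrx]
    · -- no non-support key can have residue r
      intro hb
      rcases List.mem_map.mp ((PySem.Set.mem_ofList _ _).mp hb) with ⟨p, hp, hpr⟩
      have hpe : p ∈ d.items := List.filter_sublist.subset hp
      have hpv : (p.2 == tv) = false := by
        have := List.of_mem_filter hp; simpa using this
      have hpk : p.1 ∈ d.keys := by rw [hkeys]; exact List.mem_map.mpr ⟨p, hpe, rfl⟩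
      have : p.1 ∈ pvSuppKeys d tv := hsub p.1 (List.mem_filter.mpr ⟨hpk, by simp [hpr]⟩)
      have := (hsupp p hpe).mp this
      rw [hpv] at this; exact Bool.false_ne_true this
  · rintro ⟨hs, hb⟩
    rcases List.mem_map.mp ((PySem.Set.mem_ofList _ _).mp hs) with ⟨p, hp, hpr⟩
    have hpe : p ∈ d.items := List.filter_sublist.subset hp
    have hpk : p.1 ∈ d.keys := by rw [hkeys]; exact List.mem_map.mpr ⟨p, hpe, rfl⟩
    have hpf : p.1 ∈ d.keys.filter (fun x => rk x == r) := List.mem_filter.mpr ⟨hpk, by simp [hpr]⟩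
    have hsub : forall x, x ∈ d.keys.filter (fun y => rk y == r) -> x ∈ pvSuppKeys d tv := by
      intro x hx
      have hxk := List.mem_of_mem_filter hx
      have hxr : rk x = r := by simpa using (List.mem_filter.mp hx).2
      rw [hkeys] at hxk
      rcases List.mem_map.mp hxk with ⟨q, hq, hq1⟩
      by_cases hv : (q.2 == tv) = true
      · rw [← hq1]; exact (hsupp q hq).mpr hv
      · exfalso
        apply hb
        refine (PySem.Set.mem_ofList _ _).mpr (List.mem_map.mpr ⟨q, List.mem_filter.mpr ⟨hq, by simp [hv]⟩, ?_⟩)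
        rw [hq1, hxr]
    refine List.mem_filter.mpr ⟨(PySem.Set.mem_ofList _ _).mpr (List.mem_map.mpr ⟨p.1, hpk, hpr⟩), ?_⟩
    rw [Bool.and_eq_true]
    constructor
    · rw [Bool.not_eq_eq_eq_not, Bool.not_true, List.isEmpty_eq_false_iff]
      exact List.ne_nil_of_mem hpf
    · exact (PySem.Set.issubset_iff _ _).mpr hsub

theorem pv_res_eq (d : PySem.Dict (Int × Int × Int) Int) (rk : (Int × Int × Int) → Int) (tv : Int)
    (hnd : d.keys.Nodup) : pvResA d rk tv = pvResB d rk tv := by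
  unfold pvResA pvResB
  rw [pv_st_eq]
  rw [pv_listA_eq d rk tv hnd, pv_support_eq d tv hnd]
  apply PySem.List.sorted_eq_sorted_of_perm _ _ _ (fun a b h => h)
  have hnd1 : (List.filter (fun r => !(d.keys.filter (fun x => rk x == r)).isEmpty
      && PySem.Set.issubset (d.keys.filter (fun x => rk x == r)) (pvSuppKeys d tv))
      (PySem.Set.ofList (d.keys.map rk))).Nodup := (PySem.Set.nodup_ofList _).filter _
  have hnd2 : (PySem.Set.diff (pvSpRes d rk tv) (pvBdRes d rk tv)).Nodup :=
    PySem.Set.nodup_diff _ _ (PySem.Set.nodup_ofList _)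
  rw [List.perm_ext_iff_of_nodup hnd1 hnd2]
  intro r
  rw [PySem.Set.mem_diff]
  exact pv_mem_listA_iff d rk tv hnd r

-- union-equals-support is disjointness of the two residue sets
theorem pv_bool_eq (d : PySem.Dict (Int × Int × Int) Int) (rk : (Int × Int × Int) → Int) (tv : Int)
    (hnd : d.keys.Nodup) :
    PySem.Set.equal (pvUnion d rk tv) (pvSupport d tv)
      = PySem.Set.isdisjoint (pvSpRes d rk tv) (pvBdRes d rk tv) := by
  have hkeys : d.keys = d.items.map Prod.fst := rfl
  have hsupp := pv_mem_suppKeys d.items (hkeys ▸ hnd) tv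
  have hRnd : (pvResA d rk tv).Nodup := by
    unfold pvResA
    rw [pv_listA_eq d rk tv hnd]
    exact ((PySem.List.sorted_perm _ _ _).nodup_iff).mpr ((PySem.Set.nodup_ofList _).filter _)
  have hU : pvUnion d rk tv = (pvResA d rk tv).flatMap (fun r => d.keys.filter (fun x => rk x == r)) := by
    unfold pvUnion
    rw [PySem.List.foldl_congr_mem
        (f := fun (u : PySem.Set (Int × Int × Int)) (r : Int) => PySem.Set.union u ((pvFibers d rk).getD r PySem.Set.empty))
        (g := fun (u : PySem.Set (Int × Int × Int)) (r : Int) => PySem.Set.union u (d.keys.filter (fun x => rk x == r)))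
        (h := fun acc r _ => by simp only [pv_fiber_getD d rk hnd])]
    have h := pv_union_fold rk d.keys hnd (pvResA d rk tv) hRnd PySem.Set.empty
      (by intro x hx; simp [PySem.Set.empty] at hx)
    simpa [PySem.Set.empty] using h
  have hmemA : ∀ r : Int, r ∈ pvResA d rk tv ↔ r ∈ pvSpRes d rk tv ∧ r ∉ pvBdRes d rk tv := by
    intro r
    unfold pvResA
    rw [pv_listA_eq d rk tv hnd, pv_support_eq d tv hnd, PySem.List.mem_sorted]
    exact pv_mem_listA_iff d rk tv hnd r
  rw [Bool.eq_iff_iff, PySem.Set.equal_iff, PySem.Set.isdisjoint_iff]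
  rw [hU, pv_support_eq d tv hnd]
  constructor
  · -- union == support  →  supp_res disjoint bad_res
    intro h r hr hb
    rcases List.mem_map.mp ((PySem.Set.mem_ofList _ _).mp hr) with ⟨p, hp, hpr⟩
    have hpe : p ∈ d.items := List.filter_sublist.subset hp
    have hp1 : p.1 ∈ pvSuppKeys d tv := List.mem_map.mpr ⟨p, hp, rfl⟩
    have hp1u := (h p.1).mpr hp1
    rcases List.mem_flatMap.mp hp1u with ⟨r', hr', hpf⟩
    have : rk p.1 = r' := by simpa using (List.mem_filter.mp hpf).2
    have hrr : r ∈ pvResA d rk tv := by rw [← hpr, this]; exact hr'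
    exact ((hmemA r).mp hrr).2 hb
  · -- disjoint  →  union == support
    intro h x
    constructor
    · intro hx
      rcases List.mem_flatMap.mp hx with ⟨r, hr, hxf⟩
      have hsub := ((hmemA r).mp hr)
      -- r is a support residue with no bad witness, so every key of its fiber is a support key
      have hxk := List.mem_of_mem_filter hxf
      have hxr : rk x = r := by simpa using (List.mem_filter.mp hxf).2
      rw [hkeys] at hxk
      rcases List.mem_map.mp hxk with ⟨q, hq, hq1⟩
      by_cases hv : (q.2 == tv) = true
      · rw [← hq1]; exact (hsupp q hq).mpr hv
      · exfalso
        apply hsub.2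
        refine (PySem.Set.mem_ofList _ _).mpr (List.mem_map.mpr ⟨q, List.mem_filter.mpr ⟨hq, by simp [hv]⟩, ?_⟩)
        rw [hq1, hxr]
    · intro hx
      rcases List.mem_map.mp hx with ⟨p, hp, hp1⟩
      have hpe : p ∈ d.items := List.filter_sublist.subset hp
      have hrs : rk p.1 ∈ pvSpRes d rk tv :=
        (PySem.Set.mem_ofList _ _).mpr (List.mem_map.mpr ⟨p, hp, rfl⟩)
      have hrb : rk p.1 ∉ pvBdRes d rk tv := h (rk p.1) hrs
      have hrA : rk p.1 ∈ pvResA d rk tv := (hmemA (rk p.1)).mpr ⟨hrs, hrb⟩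
      have hpk : p.1 ∈ d.keys := by rw [hkeys]; exact List.mem_map.mpr ⟨p, hpe, rfl⟩
      rw [← hp1]
      exact List.mem_flatMap.mpr ⟨rk p.1, hrA, List.mem_filter.mpr ⟨hpk, by simp⟩⟩

theorem pv_coreG (d : PySem.Dict (Int × Int × Int) Int) (rk : (Int × Int × Int) → Int) (tv mx : Int)
    (hnd : d.keys.Nodup) : pvAg d rk tv mx = pvBg d rk tv mx := by
  unfold pvAg pvBg
  have hres := pv_res_eq d rk tv hnd
  rw [hres, pv_bool_eq d rk tv hnd, pv_st_eq]

set_option maxHeartbeats 800000 in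
theorem pv_bridgeA (table : List (Int × Int × Int × Int)) (coeffs : Int × Int × Int) (tv m mx : Int) :
    support_as_small_residue_union_py table coeffs tv m mx
    = pvAg (PySem.Dict.ofList (table.map (fun q => ((q.1, q.2.1, q.2.2.1), q.2.2.2))))
        (fun k => affine_value_py k coeffs m) tv mx := rfl

set_option maxHeartbeats 800000 in
theorem pv_bridgeB (table : List (Int × Int × Int × Int)) (coeffs : Int × Int × Int) (tv m mx : Int) :
    support_as_small_residue_union_py_alt table coeffs tv m mx
    = pvBg (PySem.Dict.ofList (table.map (fun q => ((q.1, q.2.1, q.2.2.1), q.2.2.2))))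
        (fun k => affine_value_py k coeffs m) tv mx := rfl

-- ===== VERDICT (by name: the statement is the Claim_ definition above) =====
set_option maxHeartbeats 1000000 in
theorem support_as_small_residue_union_py_spec : Claim_equal_support_as_small_residue_union_py := by
  intro table coeffs target_value m max_residues _ _
  unfold Spec_support_as_small_residue_union_py
  rw [pv_bridgeA, pv_bridgeB]
  exact pv_coreG _ _ _ _ (PySem.Dict.nodup_keys_ofList _)
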